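-- pv_equiv track=rewrite | github.com/Yujiaaaaa/PACP | PromptAnatomy/new_auto_recognition.py | traverse_and_concatenate
-- ===== SOURCE A (Python) =====
-- def traverse_and_concatenate(lst):
--     results = []
--     n = len(lst)
--
--     if n == 0:
--         return results
--     if n == 1:
--         results.append((lst[0], None, None, None, None))
--         return results
--
--     for i in range(n):
--         left_context1 = lst[i-2] if i > 1 else None
--         left_context2 = lst[i-1] if i > 0 else None
--
--         right_context1 = lst[i+1] if i < n-1 else None
--         right_context2 = lst[i+2] if i < n-2 else None
--
--         results.append((lst[i], left_context1, left_context2, right_context1, right_context2))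
--
--     return results
-- ===== SOURCE B (Python) =====
-- def traverse_and_concatenate(lst):
--     pad = [None, None] + list(lst) + [None, None]
--     return [(cur, l1, l2, r1, r2)
--             for l1, l2, cur, r1, r2 in zip(pad, pad[1:], pad[2:], pad[3:], pad[4:])]
-- ===== Notes on version B (the rewrite author's own statement) =====
-- stated objective: idiomatic
-- what changed: Replaces the indexed loop with four per-iteration boundary branches by sentinel padding ([None,None] around the list) and a single zip of five shifted views, so no index arithmetic or guards remain.
import Mathlib
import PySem

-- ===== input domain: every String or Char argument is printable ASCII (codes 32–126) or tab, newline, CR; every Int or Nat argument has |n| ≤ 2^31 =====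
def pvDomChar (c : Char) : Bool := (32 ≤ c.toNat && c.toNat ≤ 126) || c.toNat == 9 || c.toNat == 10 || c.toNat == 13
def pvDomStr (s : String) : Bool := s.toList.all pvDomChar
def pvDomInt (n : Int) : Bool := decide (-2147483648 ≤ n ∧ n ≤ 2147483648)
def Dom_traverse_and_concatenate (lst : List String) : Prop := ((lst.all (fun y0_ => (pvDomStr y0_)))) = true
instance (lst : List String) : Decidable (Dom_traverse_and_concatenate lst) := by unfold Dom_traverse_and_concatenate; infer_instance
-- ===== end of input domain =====

-- B replaces A's indexed loop with four boundary branches by sentinel padding and one zip of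
-- five shifted views (objective: idiomatic; same O(n) cost).

-- ===== PORT A =====
def traverse_and_concatenate (lst : List String) : List (Option String × Option String × Option String × Option String × Option String) :=
  let n : Int := (lst.length : Int)
  if n == 0 then []
  else if n == 1 then [(PySem.List.pyGet? lst 0, none, none, none, none)]
  else
    (PySem.List.pyRange 0 n 1).foldl (fun results i =>
      let left_context1 := if i > 1 then PySem.List.pyGet? lst (i - 2) else none
      let left_context2 := if i > 0 then PySem.List.pyGet? lst (i - 1) else none
      let right_context1 := if i < n - 1 then PySem.List.pyGet? lst (i + 1) else none
      let right_context2 := if i < n - 2 then PySem.List.pyGet? lst (i + 2) else none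
      results ++ [(PySem.List.pyGet? lst i, left_context1, left_context2, right_context1, right_context2)]) []

-- ===== PORT B =====
-- 5-ary zip building the comprehension's tuple (cur, l1, l2, r1, r2); exact port of
-- 'zip(pad, pad[1:], pad[2:], pad[3:], pad[4:])' feeding the comprehension.
def pvZip5 {α : Type} : List α → List α → List α → List α → List α → List (α × α × α × α × α)
  | a :: as, b :: bs, c :: cs, d :: ds, e :: es => (c, a, b, d, e) :: pvZip5 as bs cs ds es
  | _, _, _, _, _ => []

def traverse_and_concatenate_alt (lst : List String) : List (Option String × Option String × Option String × Option String × Option String) :=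
  let pad : List (Option String) := [none, none] ++ lst.map some ++ [none, none]
  pvZip5 pad (PySem.List.slice pad (some 1) none) (PySem.List.slice pad (some 2) none)
    (PySem.List.slice pad (some 3) none) (PySem.List.slice pad (some 4) none)

-- ===== PRECONDITION & SPEC =====
def Spec_traverse_and_concatenate (lst : List String) (out : List (Option String × Option String × Option String × Option String × Option String)) : Prop := out = traverse_and_concatenate_alt lst
instance (lst : List String) (out : List (Option String × Option String × Option String × Option String × Option String)) : Decidable (Spec_traverse_and_concatenate lst out) := by unfold Spec_traverse_and_concatenate; infer_instance

-- ===== CLAIM (what is proved, stated in full; the proofs are below) =====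
def Claim_equal_traverse_and_concatenate : Prop := ∀ (lst : List String), Dom_traverse_and_concatenate lst → Spec_traverse_and_concatenate lst (traverse_and_concatenate lst)

-- ===== LEMMAS AND PROOFS =====

-- the common value both programs compute at position i
def pvEntry (lst : List String) (i : Nat) : Option String × Option String × Option String × Option String × Option String :=
  (lst[i]?, if 2 ≤ i then lst[i - 2]? else none, if 1 ≤ i then lst[i - 1]? else none,
    lst[i + 1]?, lst[i + 2]?)

lemma pvZip5_getElem? {α : Type} (as bs cs ds es : List α) (i : Nat) :
    (pvZip5 as bs cs ds es)[i]? =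
      as[i]?.bind fun a => bs[i]?.bind fun b => cs[i]?.bind fun c =>
        ds[i]?.bind fun d => es[i]?.map fun e => (c, a, b, d, e) := by
  induction as generalizing bs cs ds es i with
  | nil => simp [pvZip5]
  | cons a as ih =>
    cases bs with
    | nil => cases (a :: as)[i]? <;> simp [pvZip5]
    | cons b bs =>
      cases cs with
      | nil => cases (a :: as)[i]? <;> cases (b :: bs)[i]? <;> simp [pvZip5]
      | cons c cs =>
        cases ds with
        | nil =>
          cases (a :: as)[i]? <;> cases (b :: bs)[i]? <;> cases (c :: cs)[i]? <;> simp [pvZip5]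
        | cons d ds =>
          cases es with
          | nil =>
            cases (a :: as)[i]? <;> cases (b :: bs)[i]? <;> cases (c :: cs)[i]? <;>
              cases (d :: ds)[i]? <;> simp [pvZip5]
          | cons e es =>
            cases i with
            | zero => simp [pvZip5]
            | succ i => simpa [pvZip5] using ih bs cs ds es i

-- index formula for the padded list
lemma pvPad_getElem? (lst : List String) (j : Nat) :
    (([none, none] ++ lst.map some ++ [none, none] : List (Option String)))[j]? =
      if j < 2 then some none
      else if j < lst.length + 2 then (lst[j - 2]?).map some
      else if j < lst.length + 4 then some none
      else none := by
  match j with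
  | 0 => simp
  | 1 => simp
  | (j + 2) =>
    simp only [List.cons_append, List.nil_append, List.getElem?_cons_succ]
    by_cases h : j < lst.length
    · rw [List.getElem?_append_left (by simpa using h)]
      simp [h]
    · rw [List.getElem?_append_right (by simpa using h)]
      rcases Nat.lt_or_ge j (lst.length + 2) with h2 | h2
      · have : j - (lst.map some).length < 2 := by simp; omega
        interval_cases hh : (j - (lst.map some).length) <;> simp_all
      · have : 2 ≤ j - (lst.map some).length := by simp; omega
        rw [List.getElem?_eq_none (by simp; omega)]
        split_ifs <;> first | rfl | omega

lemma alt_eq_map (lst : List String) :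
    traverse_and_concatenate_alt lst = (List.range lst.length).map (pvEntry lst) := by
  apply List.ext_getElem?
  intro i
  simp only [traverse_and_concatenate_alt]
  rw [PySem.List.slice_from _ (show (0:Int) ≤ 1 by norm_num),
      PySem.List.slice_from _ (show (0:Int) ≤ 2 by norm_num),
      PySem.List.slice_from _ (show (0:Int) ≤ 3 by norm_num),
      PySem.List.slice_from _ (show (0:Int) ≤ 4 by norm_num)]
  rw [pvZip5_getElem?]
  simp only [List.getElem?_drop]
  rw [show ((1:Int).toNat) = 1 from rfl, show ((2:Int).toNat) = 2 from rfl,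
      show ((3:Int).toNat) = 3 from rfl, show ((4:Int).toNat) = 4 from rfl]
  rw [pvPad_getElem? lst i, pvPad_getElem? lst (1 + i), pvPad_getElem? lst (2 + i),
      pvPad_getElem? lst (3 + i), pvPad_getElem? lst (4 + i)]
  by_cases hi : i < lst.length
  · -- every factor of the bind chain is `some _`
    have f1 : (if i < 2 then some none
          else if i < lst.length + 2 then Option.map some lst[i - 2]?
          else if i < lst.length + 4 then some none else none)
        = some (if 2 ≤ i then lst[i - 2]? else none) := by
      by_cases h2 : i < 2
      · rw [if_pos h2, if_neg (by omega)]
      · rw [if_neg h2, if_pos (by omega), if_pos (by omega),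
            List.getElem?_eq_getElem (by omega)]
        rfl
    have f2 : (if 1 + i < 2 then some none
          else if 1 + i < lst.length + 2 then Option.map some lst[1 + i - 2]?
          else if 1 + i < lst.length + 4 then some none else none)
        = some (if 1 ≤ i then lst[i - 1]? else none) := by
      by_cases h2 : 1 + i < 2
      · rw [if_pos h2, if_neg (by omega)]
      · rw [if_neg h2, if_pos (by omega), show 1 + i - 2 = i - 1 by omega,
            if_pos (by omega), List.getElem?_eq_getElem (by omega)]
        rfl
    have f3 : (if 2 + i < 2 then some none
          else if 2 + i < lst.length + 2 then Option.map some lst[2 + i - 2]?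
          else if 2 + i < lst.length + 4 then some none else none)
        = some (lst[i]?) := by
      rw [if_neg (by omega), if_pos (by omega), show 2 + i - 2 = i by omega,
          List.getElem?_eq_getElem hi]
      rfl
    have f4 : (if 3 + i < 2 then some none
          else if 3 + i < lst.length + 2 then Option.map some lst[3 + i - 2]?
          else if 3 + i < lst.length + 4 then some none else none)
        = some (lst[i + 1]?) := by
      by_cases h2 : i + 1 < lst.length
      · rw [if_neg (by omega), if_pos (by omega), show 3 + i - 2 = i + 1 by omega,
            List.getElem?_eq_getElem h2]
        rfl
      · rw [if_neg (by omega), if_neg (by omega), if_pos (by omega),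
            List.getElem?_eq_none (by omega)]
    have f5 : (if 4 + i < 2 then some none
          else if 4 + i < lst.length + 2 then Option.map some lst[4 + i - 2]?
          else if 4 + i < lst.length + 4 then some none else none)
        = some (lst[i + 2]?) := by
      by_cases h2 : i + 2 < lst.length
      · rw [if_neg (by omega), if_pos (by omega), show 4 + i - 2 = i + 2 by omega,
            List.getElem?_eq_getElem h2]
        rfl
      · rw [if_neg (by omega), if_neg (by omega), if_pos (by omega),
            List.getElem?_eq_none (by omega)]
    rw [f1, f2, f3, f4, f5, List.getElem?_map, List.getElem?_range hi]
    simp [pvEntry]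
  · -- past the end: the fifth factor is `none`, so the whole chain is `none`
    have f5 : (if 4 + i < 2 then some none
          else if 4 + i < lst.length + 2 then Option.map some lst[4 + i - 2]?
          else if 4 + i < lst.length + 4 then some none else none)
        = none := by
      rw [if_neg (by omega), if_neg (by omega), if_neg (by omega)]
    have hbind : ∀ {α β : Type} (x : Option α),
        (x.bind fun _ => (none : Option β)) = none := by
      intro α β x; cases x <;> rfl
    rw [f5, List.getElem?_map,
        List.getElem?_eq_none (l := List.range lst.length) (by simpa using hi)]
    simp only [Option.map_none, hbind]

lemma a_eq_map (lst : List String) :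
    traverse_and_concatenate lst = (List.range lst.length).map (pvEntry lst) := by
  unfold traverse_and_concatenate
  by_cases h0 : lst.length = 0
  · simp [List.length_eq_zero_iff.mp h0]
  · by_cases h1 : lst.length = 1
    · obtain ⟨a, ha⟩ := List.length_eq_one_iff.mp h1
      subst ha
      simp [pvEntry, List.range_succ]
    · have hne0 : ((lst.length : Int) == 0) = false := by
        rw [beq_eq_false_iff_ne]; exact_mod_cast h0
      have hne1 : ((lst.length : Int) == 1) = false := by
        rw [beq_eq_false_iff_ne]; exact_mod_cast h1
      simp only [hne0, hne1, Bool.false_eq_true, if_false]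
      rw [PySem.List.foldl_append_singleton_eq_map, List.nil_append,
          PySem.List.pyRange_zero_natCast, List.map_map]
      apply List.map_congr_left
      intro i hi
      have hilt : i < lst.length := List.mem_range.mp hi
      simp only [Function.comp, pvEntry, Prod.mk.injEq]
      refine ⟨by simp, ?_, ?_, ?_, ?_⟩
      · split_ifs with hc hc' hc'
        · have : ((i : Int) - 2) = ((i - 2 : Nat) : Int) := by omega
          rw [this]; simp
        · omega
        · omega
        · rfl
      · split_ifs with hc hc' hc'
        · have : ((i : Int) - 1) = ((i - 1 : Nat) : Int) := by omega
          rw [this]; simp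
        · omega
        · omega
        · rfl
      · split_ifs with hc
        · have : ((i : Int) + 1) = ((i + 1 : Nat) : Int) := by omega
          rw [this, PySem.List.pyGet?_natCast]
        · rw [List.getElem?_eq_none (by omega)]
      · split_ifs with hc
        · have : ((i : Int) + 2) = ((i + 2 : Nat) : Int) := by omega
          rw [this, PySem.List.pyGet?_natCast]
        · rw [List.getElem?_eq_none (by omega)]

-- ===== VERDICT (by name: the statement is the Claim_ definition above) =====
theorem traverse_and_concatenate_spec : Claim_equal_traverse_and_concatenate := by
  intro lst _
  unfold Spec_traverse_and_concatenate
  rw [a_eq_map, alt_eq_map]
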